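-- pv_equiv track=rewrite | github.com/pr0li/gdb-automated-pewpewboat | boat_coords.py | load_coords
-- ===== SOURCE A (Python) =====
-- def load_coords(num):
-- 	letters = ['A','B','C','D','E','F','G','H']
-- 	numbers = ['1','2','3','4','5','6','7','8']
-- 	coordinates = []
--
-- 	for l in letters:
-- 		for n in numbers:
-- 			if (num & 1) > 0:
-- 				coordinates.append(l+n)
-- 			num = num >> 1
--
-- 	return coordinates
-- ===== SOURCE B (Python) =====
-- def load_coords(num):
--     m = num & 0xFFFFFFFFFFFFFFFF
--     coordinates = []
--     while m:
--         low = m & (m - 1)                 # clear the lowest set bit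
--         i = (m - low).bit_length() - 1    # index of that bit
--         coordinates.append(chr(65 + i // 8) + chr(49 + i % 8))
--         m = low
--     return coordinates
-- ===== Notes on version B (the rewrite author's own statement) =====
-- stated objective: alternative
-- what changed: B masks num once to the grid-sized bit field and then iterates only over the SET bits, repeatedly clearing the lowest set bit (m & (m-1)) and computing each label arithmetically from the bit index via bit_length, instead of A's nested letter/number loops that shift num and test every bit of the grid.
import Mathlib
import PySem

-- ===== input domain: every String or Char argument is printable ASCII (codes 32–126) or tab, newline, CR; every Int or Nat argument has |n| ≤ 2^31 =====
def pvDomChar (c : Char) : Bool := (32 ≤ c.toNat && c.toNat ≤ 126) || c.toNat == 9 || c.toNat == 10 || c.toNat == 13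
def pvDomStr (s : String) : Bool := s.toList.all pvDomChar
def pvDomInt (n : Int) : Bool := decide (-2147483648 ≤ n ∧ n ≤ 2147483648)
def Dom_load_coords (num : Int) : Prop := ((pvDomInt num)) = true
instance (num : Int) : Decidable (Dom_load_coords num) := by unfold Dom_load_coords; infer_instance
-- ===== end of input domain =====

-- B masks num to 64 bits once and then visits only the SET bits (clearing the lowest set
-- bit each round, label computed arithmetically from the bit index), instead of A's nested
-- loops shifting num once per grid cell; objective: alternative algorithm.

-- ===== PORT A =====
def pvLetters : List String := ["A","B","C","D","E","F","G","H"]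
def pvNumbers : List String := ["1","2","3","4","5","6","7","8"]

def load_coords (num : Int) : List String :=
  (pvLetters.foldl
    (fun s l => pvNumbers.foldl
      (fun (s : Int × List String) n =>
        (s.1 >>> (1 : Nat), if 0 < PySem.Int.band s.1 1 then s.2 ++ [l ++ n] else s.2))
      s)
    ((num, []) : Int × List String)).2

-- ===== PORT B =====
def pvLabel (i : Nat) : String := String.ofList [Char.ofNat (65 + i / 8), Char.ofNat (49 + i % 8)]

-- m is the masked value, always ≥ 0 when called from the entry point; the 'm ≤ 0' guard is
-- the totality rendering of Python's 'while m:' (Python would never see a negative m here).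
def pvLoopB (m : Int) (out : List String) : List String :=
  if _h : m ≤ 0 then out
  else
    pvLoopB (PySem.Int.band m (m - 1))
      (out ++ [pvLabel (PySem.Int.bitLength (m - PySem.Int.band m (m - 1)) - 1)])
termination_by m.toNat
decreasing_by
  have h0 : (0:Int) ≤ m := le_of_lt (lt_of_not_ge _h)
  rw [PySem.Int.band_of_nonneg h0 (by omega)]
  have := @Nat.and_le_right m.toNat (m-1).toNat
  omega

def load_coords_alt (num : Int) : List String :=
  pvLoopB (PySem.Int.band num 18446744073709551615) []

-- ===== PRECONDITION & SPEC =====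
def Spec_load_coords (num : Int) (out : List String) : Prop := out = load_coords_alt num
instance (num : Int) (out : List String) : Decidable (Spec_load_coords num out) := by unfold Spec_load_coords; infer_instance

-- ===== CLAIM (what is proved, stated in full; the proofs are below) =====
def Claim_equal_load_coords : Prop := ∀ (num : Int), Dom_load_coords num → Spec_load_coords num (load_coords num)

-- ===== LEMMAS AND PROOFS =====

/-- Reference selection: labels of the set bits of `n`, lowest first, offset `k`. -/
def pvSpec (n k : Nat) : List String :=
  if n = 0 then [] else
    (if n % 2 = 1 then [pvLabel k] else []) ++ pvSpec (n / 2) (k + 1)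
termination_by n
decreasing_by exact Nat.div_lt_self (by omega) (by omega)

/-- A-side canonical selection, as in the nested folds. -/
def pvSel (m : Int) : List String → List String
  | [] => []
  | lab :: ls => (if 0 < PySem.Int.band m 1 then [lab] else []) ++ pvSel (m >>> (1 : Nat)) ls

-- ---- A-side: the nested folds compute pvSel ----

theorem pvA_pair {α : Type} (g : α → String) (ls : List α) : ∀ (m : Int) (acc : List String),
    ls.foldl
      (fun (s : Int × List String) x =>
        (s.1 >>> (1 : Nat), if 0 < PySem.Int.band s.1 1 then s.2 ++ [g x] else s.2))
      (m, acc)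
    = (m >>> ls.length, acc ++ pvSel m (ls.map g)) := by
  induction ls with
  | nil => intro m acc; simp [pvSel]
  | cons x ls ih =>
    intro m acc
    simp only [List.foldl_cons, List.map_cons, pvSel, ih, List.length_cons]
    refine Prod.ext ?_ ?_
    · show m >>> (1 : Nat) >>> ls.length = m >>> (ls.length + 1)
      rw [show ls.length + 1 = 1 + ls.length from by omega, Int.shiftRight_add]
    · show (if 0 < PySem.Int.band m 1 then acc ++ [g x] else acc) ++ pvSel (m >>> (1:Nat)) (ls.map g)
        = acc ++ ((if 0 < PySem.Int.band m 1 then [g x] else []) ++ pvSel (m >>> (1:Nat)) (ls.map g))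
      split_ifs <;> simp

theorem pvSel_append (as bs : List String) : ∀ m : Int,
    pvSel m (as ++ bs) = pvSel m as ++ pvSel (m >>> as.length) bs := by
  induction as with
  | nil => intro m; simp [pvSel]
  | cons a as ih =>
    intro m
    simp only [List.cons_append, pvSel, ih, List.length_cons]
    rw [show as.length + 1 = 1 + as.length from by omega, Int.shiftRight_add]
    simp

theorem pvA_outer (ys : List String) (xs : List String) : ∀ (m : Int) (acc : List String),
    xs.foldl
      (fun s l => ys.foldl
        (fun (s : Int × List String) n =>
          (s.1 >>> (1 : Nat), if 0 < PySem.Int.band s.1 1 then s.2 ++ [l ++ n] else s.2))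
        s)
      (m, acc)
    = (m >>> (xs.length * ys.length),
       acc ++ pvSel m (xs.flatMap (fun l => ys.map (fun n => l ++ n)))) := by
  induction xs with
  | nil => intro m acc; simp [pvSel]
  | cons l xs ih =>
    intro m acc
    simp only [List.foldl_cons, List.flatMap_cons]
    rw [pvA_pair (fun n => l ++ n) ys m acc, ih, pvSel_append, List.length_map]
    refine Prod.ext ?_ ?_
    · show m >>> ys.length >>> (xs.length * ys.length) = m >>> ((xs.length + 1) * ys.length)
      rw [show (xs.length + 1) * ys.length = ys.length + xs.length * ys.length from by ring,
          Int.shiftRight_add]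
    · simp

-- ---- bit arithmetic ----

/-- One halving step of Nat `&&&`. -/
theorem pvNatStep (a b : Nat) : a &&& b = a % 2 * (b % 2) + 2 * (a / 2 &&& b / 2) := by
  apply Nat.eq_of_testBit_eq
  intro j
  cases j with
  | zero =>
    simp only [Nat.testBit_zero]
    rcases Nat.mod_two_eq_zero_or_one a with h1 | h1 <;>
      rcases Nat.mod_two_eq_zero_or_one b with h2 | h2 <;>
      simp [h1, h2, Nat.add_mul_mod_self_left]
  | succ j =>
    have hdiv : (a % 2 * (b % 2) + 2 * (a / 2 &&& b / 2)) / 2 = a / 2 &&& b / 2 := by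
      rcases Nat.mod_two_eq_zero_or_one a with h1 | h1 <;>
        rcases Nat.mod_two_eq_zero_or_one b with h2 | h2 <;> simp [h1, h2] <;> omega
    rw [Nat.testBit_land]
    simp only [Nat.testBit_add_one]
    rw [hdiv, Nat.testBit_land]

/-- Clearing the lowest set bit of `2^k * n` for odd `n`. -/
theorem pvClearLow (k : Nat) : ∀ n : Nat, n % 2 = 1 → 2 ^ k * n &&& (2 ^ k * n - 1) = 2 ^ k * (n - 1) := by
  induction k with
  | zero =>
    intro n hn
    rw [pvNatStep]
    have h1 : (n - 1) % 2 = 0 := by omega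
    have h2 : (n - 1) / 2 = n / 2 := by omega
    simp only [pow_zero, one_mul, hn, h1, Nat.and_self, h2]
    omega
  | succ k ih =>
    intro n hn
    have hP : 0 < 2 ^ k := Nat.pow_pos (by omega)
    have hx : 2 ^ (k + 1) * n = 2 * (2 ^ k * n) := by ring
    have hx2 : 2 ^ (k + 1) * (n - 1) = 2 * (2 ^ k * (n - 1)) := by ring
    have hpos : 0 < 2 ^ k * n := Nat.mul_pos hP (by omega)
    rw [pvNatStep, hx, hx2]
    have e1 : 2 * (2 ^ k * n) % 2 = 0 := by omega
    have e2 : 2 * (2 ^ k * n) / 2 = 2 ^ k * n := by omega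
    have e3 : (2 * (2 ^ k * n) - 1) / 2 = 2 ^ k * n - 1 := by omega
    rw [e1, e2, e3, ih n hn]
    omega

theorem pvBitLengthPow (k : Nat) : PySem.Int.bitLength ((2 ^ k : Nat) : Int) = k + 1 := by
  set bl := PySem.Int.bitLength ((2 ^ k : Nat) : Int) with hbl
  have hlt := PySem.Int.lt_two_pow_bitLength ((2 ^ k : Nat) : Int)
  have hP : 0 < 2 ^ k := Nat.pow_pos (by omega)
  have hne : ((2 ^ k : Nat) : Int) ≠ 0 := by exact_mod_cast hP.ne'
  have hle := PySem.Int.two_pow_bitLength_le ((2 ^ k : Nat) : Int) hne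
  rw [Int.natAbs_natCast] at hlt hle
  have h1 : k < bl := (Nat.pow_lt_pow_iff_right (by omega)).1 hlt
  have h2 : bl - 1 ≤ k := (Nat.pow_le_pow_iff_right (by omega)).1 hle
  omega

-- ---- B-side: pvLoopB computes pvSpec ----

theorem pvB_spec : ∀ n k (out : List String),
    pvLoopB ((2 ^ k * n : Nat) : Int) out = out ++ pvSpec n k := by
  intro n
  induction n using Nat.strong_induction_on with
  | _ n ih =>
    intro k out
    have hP : 0 < 2 ^ k := Nat.pow_pos (by omega)
    rcases Nat.eq_zero_or_pos n with h0 | hpos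
    · rw [h0, pvLoopB, pvSpec]; simp
    have hmpos : 0 < 2 ^ k * n := Nat.mul_pos hP hpos
    rcases Nat.mod_two_eq_zero_or_one n with he | ho
    · -- even
      have e : 2 ^ k * n = 2 ^ (k + 1) * (n / 2) := by
        have h2 : 2 * (n / 2) = n := by omega
        calc 2 ^ k * n = 2 ^ k * (2 * (n / 2)) := by rw [h2]
          _ = 2 ^ (k + 1) * (n / 2) := by ring
      rw [e, ih (n / 2) (Nat.div_lt_self hpos (by omega)) (k + 1) out]
      conv_rhs => rw [pvSpec]
      simp [hpos.ne', he]
    · -- odd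
      rw [pvLoopB]
      have hg : ¬ (((2 ^ k * n : Nat) : Int) ≤ 0) := by
        have : (0 : Int) < ((2 ^ k * n : Nat) : Int) := by exact_mod_cast hmpos
        omega
      rw [dif_neg hg]
      have hcast : ((2 ^ k * n : Nat) : Int) - 1 = ((2 ^ k * n - 1 : Nat) : Int) := by
        have : (1 : Int) ≤ ((2 ^ k * n : Nat) : Int) := by exact_mod_cast hmpos
        omega
      rw [hcast, PySem.Int.band_natCast, pvClearLow k n ho]
      have hmono : 2 ^ k * (n - 1) ≤ 2 ^ k * n := Nat.mul_le_mul_left _ (by omega)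
      have hnsub : 2 ^ k * n - 2 ^ k * (n - 1) = 2 ^ k := by
        have h1 : 2 ^ k * n = 2 ^ k * (n - 1) + 2 ^ k := by
          calc 2 ^ k * n = 2 ^ k * ((n - 1) + 1) := by congr 1; omega
            _ = 2 ^ k * (n - 1) + 2 ^ k := by ring
        omega
      have hsub : ((2 ^ k * n : Nat) : Int) - ((2 ^ k * (n - 1) : Nat) : Int) = ((2 ^ k : Nat) : Int) := by
        rw [← Int.natCast_sub hmono, hnsub]
      rw [hsub, pvBitLengthPow]
      have e2 : 2 ^ k * (n - 1) = 2 ^ (k + 1) * ((n - 1) / 2) := by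
        have h2 : 2 * ((n - 1) / 2) = n - 1 := by omega
        calc 2 ^ k * (n - 1) = 2 ^ k * (2 * ((n - 1) / 2)) := by rw [h2]
          _ = 2 ^ (k + 1) * ((n - 1) / 2) := by ring
      rw [e2, ih ((n - 1) / 2) (by omega) (k + 1) (out ++ [pvLabel (k + 1 - 1)])]
      conv_rhs => rw [pvSpec]
      have hq : (n - 1) / 2 = n / 2 := by omega
      simp [hpos.ne', ho, hq]

-- ---- bridging: band with an odd mask halves ----

theorem pvModEmod (m : Int) : PySem.Int.mod m 2 = m % 2 := by
  show Int.fmod m 2 = m % 2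
  rw [Int.fmod_eq_emod]; simp

theorem pvShiftOne (m : Int) : m >>> (1 : Nat) = m / 2 := by
  rw [Int.shiftRight_eq_div_pow]; norm_num

theorem pvModTwo (m : Int) : PySem.Int.mod m 2 = 0 ∨ PySem.Int.mod m 2 = 1 := by
  rw [pvModEmod]; omega

theorem pvBandStep (m : Int) (M : Nat) :
    PySem.Int.band m ((2 * M + 1 : Nat) : Int)
      = PySem.Int.mod m 2 + 2 * PySem.Int.band (m >>> (1 : Nat)) ((M : Nat) : Int) := by
  rw [pvModEmod, pvShiftOne]
  by_cases hm : 0 ≤ m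
  · -- m ≥ 0
    have hd : (0 : Int) ≤ m / 2 := Int.ediv_nonneg hm (by norm_num)
    rw [PySem.Int.band_of_nonneg hm (by positivity),
        PySem.Int.band_of_nonneg hd (by positivity)]
    have h1 : m.toNat &&& ((2 * M + 1 : Nat) : Int).toNat
        = m.toNat % 2 + 2 * (m.toNat / 2 &&& M) := by
      have h4 : ((2 * M + 1 : Nat) : Int).toNat = 2 * M + 1 := by omega
      rw [h4, pvNatStep]
      have e1 : (2 * M + 1) % 2 = 1 := by omega
      have e2 : (2 * M + 1) / 2 = M := by omega
      rw [e1, e2]; omega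
    have h2 : (m / 2).toNat = m.toNat / 2 := by omega
    have h5 : ((M : Nat) : Int).toNat = M := by omega
    rw [h1, h2, h5]
    have h3 : m % 2 = ((m.toNat % 2 : Nat) : Int) := by omega
    rw [h3]
    push_cast
    ring
  · -- m < 0
    rw [not_le] at hm
    have hc : m = -(((-m - 1).toNat : Nat) : Int) - 1 := by omega
    set c : Nat := (-m - 1).toNat with hcdef
    have hd : m / 2 = -((c / 2 : Nat) : Int) - 1 := by omega
    have hdneg : m / 2 < 0 := by omega
    have hL : PySem.Int.band m ((2 * M + 1 : Nat) : Int)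
        = (((2 * M + 1) - ((2 * M + 1) &&& c) : Nat) : Int) := by
      unfold PySem.Int.band
      rw [if_neg (by omega), if_pos (by positivity)]
      have e1 : ((2 * M + 1 : Nat) : Int).toNat = 2 * M + 1 := by omega
      have e2 : (-m - 1).toNat = c := by omega
      rw [e1, e2]
    have hR : PySem.Int.band (m / 2) ((M : Nat) : Int)
        = ((M - (M &&& (c / 2)) : Nat) : Int) := by
      unfold PySem.Int.band
      rw [if_neg (by omega), if_pos (by positivity)]
      have e1 : ((M : Nat) : Int).toNat = M := by omega
      have e2 : (-(m / 2) - 1).toNat = c / 2 := by omega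
      rw [e1, e2]
    have hstep : (2 * M + 1) &&& c = c % 2 + 2 * (M &&& (c / 2)) := by
      rw [pvNatStep]
      have e1 : (2 * M + 1) % 2 = 1 := by omega
      have e2 : (2 * M + 1) / 2 = M := by omega
      rw [e1, e2]; omega
    have hle : M &&& (c / 2) ≤ M := Nat.and_le_left
    have hland : (2 * M + 1) &&& c ≤ 2 * M + 1 := Nat.and_le_left
    rw [hL, hR, hstep]
    omega

theorem pvBandMaskNonneg (m : Int) (M : Nat) : 0 ≤ PySem.Int.band m ((M : Nat) : Int) := by
  have hM : (0 : Int) ≤ ((M : Nat) : Int) := by positivity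
  unfold PySem.Int.band
  split_ifs <;> first | positivity | omega

theorem pvSpec_zero (k : Nat) : pvSpec 0 k = [] := by
  rw [pvSpec]; simp

theorem pvSpec_step (b t k : Nat) (ht : t ≤ 1) :
    pvSpec (t + 2 * b) k = (if t = 1 then [pvLabel k] else []) ++ pvSpec b (k + 1) := by
  rcases Nat.eq_zero_or_pos (t + 2 * b) with h0 | hp
  · have ht0 : t = 0 := by omega
    have hb0 : b = 0 := by omega
    rw [h0, ht0, hb0, pvSpec_zero, pvSpec_zero]
    simp
  · rw [pvSpec, if_neg (by omega)]
    have hmod : (t + 2 * b) % 2 = t := by omega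
    have hdiv : (t + 2 * b) / 2 = b := by omega
    rw [hmod, hdiv]

/-- A-side selection over a table of consecutive labels equals pvSpec of the masked value. -/
theorem pvSel_spec : ∀ (ls : List String) (k : Nat) (m : Int),
    (∀ i, i < ls.length → ls.getD i "" = pvLabel (k + i)) →
    pvSel m ls = pvSpec (PySem.Int.band m ((2 ^ ls.length - 1 : Nat) : Int)).toNat k := by
  intro ls
  induction ls with
  | nil =>
    intro k m _
    simp only [List.length_nil, pow_zero, Nat.sub_self, Nat.cast_zero, PySem.Int.band_zero]
    rw [pvSel, pvSpec]
    simp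
  | cons l ls ih =>
    intro k m h
    have hLpos : 0 < 2 ^ ls.length := Nat.pow_pos (by omega)
    have hmask : ((2 ^ (l :: ls).length - 1 : Nat) : Int)
        = ((2 * (2 ^ ls.length - 1) + 1 : Nat) : Int) := by
      simp only [List.length_cons, pow_succ]
      congr 1
      omega
    rw [hmask, pvBandStep]
    have hr := pvModTwo m
    have hB : 0 ≤ PySem.Int.band (m >>> (1 : Nat)) ((2 ^ ls.length - 1 : Nat) : Int) :=
      pvBandMaskNonneg _ _
    set r : Int := PySem.Int.mod m 2 with hrdef
    set B : Int := PySem.Int.band (m >>> (1 : Nat)) ((2 ^ ls.length - 1 : Nat) : Int) with hBdef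
    have hn : (r + 2 * B).toNat = r.toNat + 2 * B.toNat := by omega
    have hl : l = pvLabel k := by
      have := h 0 (by simp)
      simpa using this
    have htail : ∀ i, i < ls.length → ls.getD i "" = pvLabel (k + 1 + i) := by
      intro i hi
      have := h (i + 1) (by simpa using Nat.succ_lt_succ hi)
      simpa [Nat.add_assoc, Nat.add_comm 1 i] using this
    have hIH := ih (k + 1) (m >>> (1 : Nat)) htail
    have hb1 : PySem.Int.band m 1 = r := by rw [PySem.Int.band_one, ← hrdef]
    rw [pvSel, hIH, ← hBdef, hb1]
    have hsplit : (r + 2 * B).toNat = r.toNat + 2 * B.toNat := by omega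
    rw [hsplit, pvSpec_step B.toNat r.toNat k (by omega)]
    rcases hr with h | h <;> rw [h] <;> norm_num
    exact hl

-- ===== VERDICT (by name: the statement is the Claim_ definition above) =====
theorem load_coords_spec : Claim_equal_load_coords := by
  intro num _
  unfold Spec_load_coords load_coords load_coords_alt
  rw [pvA_outer]
  simp only
  have hlab : ∀ i, i < (pvLetters.flatMap (fun l => pvNumbers.map (fun n => l ++ n))).length →
      (pvLetters.flatMap (fun l => pvNumbers.map (fun n => l ++ n))).getD i "" = pvLabel (0 + i) := by
    decide
  rw [pvSel_spec _ 0 num hlab]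
  have hlen : (pvLetters.flatMap (fun l => pvNumbers.map (fun n => l ++ n))).length = 64 := by decide
  rw [hlen]
  have hmask : ((2 ^ 64 - 1 : Nat) : Int) = (18446744073709551615 : Int) := by norm_num
  rw [hmask]
  have hN : PySem.Int.band num 18446744073709551615
      = (((PySem.Int.band num 18446744073709551615).toNat : Nat) : Int) := by
    have h0 : (0:Int) ≤ PySem.Int.band num 18446744073709551615 := by
      have := pvBandMaskNonneg num 18446744073709551615
      simpa using this
    omega
  have hB := pvB_spec (PySem.Int.band num 18446744073709551615).toNat 0 []
  simp only [pow_zero, one_mul, List.nil_append] at hB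
  rw [← hN] at hB
  rw [hB]
  simp
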